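-- pv_equiv track=rewrite | github.com/abhisha1991/LeetCodePractice | Python/MaxPointsYouCanObtainFromCards.py | maxScore
-- ===== SOURCE A (Python) =====
-- from typing import List
--
-- def maxScore(cardPoints: List[int], k: int) -> int:
--     n = len(cardPoints)
--     if k >= n:
--         return sum(cardPoints)
--
--     window = n - k
--     s = sum(cardPoints)
--     # cur is the current window sum
--     cur = sum(cardPoints[:window])
--
--     maxSum = s - cur
--     i = 1
--     j = window
--     while j < n:
--         # sliding window - remove from left, add from right
--         cur = cur - cardPoints[i-1] + cardPoints[j]
--         # everything minus window is the set of cards you can pick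
--         if s - cur > maxSum:
--             maxSum = s - cur
--         i +=1
--         j +=1
--
--     return maxSum
-- ===== SOURCE B (Python) =====
-- def maxScore(cardPoints, k):
--     n = len(cardPoints)
--     if k >= n:
--         return sum(cardPoints)
--     # staged passes: build a cumulative-sum table once, then pick the best split by lookup
--     pre = [0]
--     for x in cardPoints:
--         pre.append(pre[-1] + x)
--     total = pre[n]
--     return max(pre[i] + total - pre[n - k + i] for i in range(k + 1))
-- ===== Notes on version B (the rewrite author's own statement) =====
-- stated objective: alternative
-- what changed: B drops A's incremental sliding window entirely: it precomputes a cumulative-sum table pre once and returns the max over i of pre[i] + total - pre[n-k+i] by direct table lookups (staged passes, no running window state).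
-- outside the precondition, e.g. on maxScore([1, 2], -1): A returns 0, B raises ValueError
import Mathlib
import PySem

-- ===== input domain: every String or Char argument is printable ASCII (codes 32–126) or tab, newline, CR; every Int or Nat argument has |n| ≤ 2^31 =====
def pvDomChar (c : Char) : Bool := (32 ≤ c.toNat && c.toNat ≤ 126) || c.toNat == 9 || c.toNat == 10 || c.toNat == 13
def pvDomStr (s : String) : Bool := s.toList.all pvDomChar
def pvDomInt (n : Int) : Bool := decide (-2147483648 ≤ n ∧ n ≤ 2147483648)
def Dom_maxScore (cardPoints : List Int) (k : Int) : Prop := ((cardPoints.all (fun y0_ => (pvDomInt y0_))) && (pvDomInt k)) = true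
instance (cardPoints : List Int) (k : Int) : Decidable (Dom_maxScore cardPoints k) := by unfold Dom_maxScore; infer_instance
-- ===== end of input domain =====

-- B replaces A's incremental sliding window with a precomputed cumulative-sum table and a
-- direct max over k+1 table lookups; same O(n) cost, genuinely different decomposition.

-- ===== PORT A =====
def maxScore (cardPoints : List Int) (k : Int) : Int :=
  let n : Int := cardPoints.length
  if k ≥ n then cardPoints.sum
  else
    let window := n - k
    let s := cardPoints.sum
    let cur := (PySem.List.slice cardPoints none (some window)).sum
    let maxSum := s - cur
    let r := (PySem.List.pyRange window n 1).foldl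
      (fun (st : Int × Int × Int) j =>
        let cur := st.1 - PySem.List.pyGetD cardPoints (st.2.2 - 1) 0
                        + PySem.List.pyGetD cardPoints j 0
        (cur, if s - cur > st.2.1 then s - cur else st.2.1, st.2.2 + 1))
      (cur, maxSum, 1)
    r.2.1

-- ===== PORT B =====
def maxScore_alt (cardPoints : List Int) (k : Int) : Int :=
  let n : Int := cardPoints.length
  if k ≥ n then cardPoints.sum
  else
    let pre := cardPoints.foldl
      (fun (acc : List Int) x => acc ++ [PySem.List.pyGetD acc (-1) 0 + x]) [0]
    let total := PySem.List.pyGetD pre n 0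
    (PySem.List.max?
      ((PySem.List.pyRange 0 (k + 1) 1).map
        (fun i => PySem.List.pyGetD pre i 0 + total - PySem.List.pyGetD pre (n - k + i) 0))
      (fun y => y)).getD 0

-- ===== PRECONDITION & SPEC =====
-- Pre_ excludes negative k, on which A's skipped loop accidentally returns 0 while B's
-- max over the empty range(k+1) raises ValueError.
def Pre_maxScore (cardPoints : List Int) (k : Int) : Prop := 0 ≤ k
instance (cardPoints : List Int) (k : Int) : Decidable (Pre_maxScore cardPoints k) := by unfold Pre_maxScore; infer_instance
def pvWitness_maxScore : List Int × Int := ([1, 2, 3], 2)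
def Spec_maxScore (cardPoints : List Int) (k : Int) (out : Int) : Prop := out = maxScore_alt cardPoints k
instance (cardPoints : List Int) (k : Int) (out : Int) : Decidable (Spec_maxScore cardPoints k out) := by unfold Spec_maxScore; infer_instance

-- ===== CLAIM (what is proved, stated in full; the proofs are below) =====
def Claim_equal_maxScore : Prop := ∀ (cardPoints : List Int) (k : Int), Dom_maxScore cardPoints k → Pre_maxScore cardPoints k → Spec_maxScore cardPoints k (maxScore cardPoints k)

-- ===== LEMMAS AND PROOFS =====

-- the cumulative-sum table B builds is the list of take-sums
lemma pv_pre_spec (xs : List Int) :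
    xs.foldl (fun (acc : List Int) x => acc ++ [PySem.List.pyGetD acc (-1) 0 + x]) [0]
      = (List.range (xs.length + 1)).map (fun i => (xs.take i).sum) := by
  induction xs using List.reverseRecOn with
  | nil => simp
  | append_singleton xs x ih =>
      rw [List.foldl_append, ih]
      simp only [List.foldl_cons, List.foldl_nil, List.length_append, List.length_cons,
        List.length_nil]
      have hsplit : List.range (xs.length + 1)
          = List.range xs.length ++ [xs.length] := List.range_succ
      rw [hsplit, List.map_append]
      simp only [List.map_cons, List.map_nil]
      rw [PySem.List.pyGetD_neg_one_append_singleton]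
      have h2 : List.range (xs.length + 1 + 1)
          = (List.range xs.length ++ [xs.length]) ++ [xs.length + 1] := by
        rw [List.range_succ, List.range_succ]
      rw [h2, List.map_append, List.map_append]
      congr 1
      · congr 1
        · apply List.map_congr_left
          intro i hi
          rw [List.mem_range] at hi
          rw [List.take_append_of_le_length (by omega)]
        · simp [List.take_append_of_le_length (le_refl xs.length),
                List.take_of_length_le (le_refl xs.length)]
      · have : (xs ++ [x]).take (xs.length + 1) = xs ++ [x] :=
          List.take_of_length_le (by simp)
        simp [this]

-- look up the table at a Nat index
lemma pv_pre_get (xs : List Int) (i : Nat) (hi : i ≤ xs.length) :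
    PySem.List.pyGetD ((List.range (xs.length + 1)).map (fun j => (xs.take j).sum)) (i : Int) 0
      = (xs.take i).sum := by
  rw [PySem.List.pyGetD_natCast]
  rw [List.getD_eq_getElem?_getD, List.getElem?_map, List.getElem?_range (by omega)]
  simp

-- A's sliding-window loop, after m steps from window offset wn
lemma pv_A_inv (xs : List Int) (s : Int) (wn m : Nat) (hm : wn + m ≤ xs.length) :
    (((List.range m).map (fun (t : Nat) => ((wn : Int) + t))).foldl
      (fun (st : Int × Int × Int) j =>
        let cur := st.1 - PySem.List.pyGetD xs (st.2.2 - 1) 0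
                        + PySem.List.pyGetD xs j 0
        (cur, if s - cur > st.2.1 then s - cur else st.2.1, st.2.2 + 1))
      ((xs.take wn).sum, s - (xs.take wn).sum, 1))
    = ((xs.take (wn + m)).sum - (xs.take m).sum,
       (List.range m).foldl
         (fun acc t => max acc (s - ((xs.take (wn + (t+1))).sum - (xs.take (t+1)).sum)))
         (s - (xs.take wn).sum),
       (m : Int) + 1) := by
  induction m with
  | zero => simp
  | succ m ih =>
      have hm' : wn + m ≤ xs.length := by omega
      rw [List.range_succ, List.map_append, List.foldl_append, ih hm']
      simp only [List.map_cons, List.map_nil, List.foldl_cons, List.foldl_nil]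
      rw [List.foldl_append]
      simp only [List.foldl_cons, List.foldl_nil]
      have hgm : PySem.List.pyGetD xs ((m : Int) + 1 - 1) 0 = xs[m]'(by omega) := by
        have hc : ((m : Int) + 1 - 1) = ((m : Nat) : Int) := by ring
        rw [hc, PySem.List.pyGetD_eq_getElem xs (i := ((m : Nat) : Int)) 0 (by omega) (by
          omega)]
        simp
      have hgj : PySem.List.pyGetD xs ((wn : Int) + (m : Int)) 0 = xs[wn + m]'(by omega) := by
        have hc : ((wn : Int) + (m : Int)) = ((wn + m : Nat) : Int) := by push_cast; ring
        rw [hc, PySem.List.pyGetD_eq_getElem xs (i := ((wn + m : Nat) : Int)) 0 (by omega) (by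
          push_cast; omega)]
        simp only [Int.toNat_natCast]
      rw [hgm, hgj]
      have hc : (xs.take (wn + m)).sum - (xs.take m).sum - xs[m]'(by omega) + xs[wn + m]'(by omega)
          = (xs.take (wn + (m + 1))).sum - (xs.take (m + 1)).sum := by
        rw [show wn + (m + 1) = (wn + m) + 1 from by ring,
            List.sum_take_succ xs (wn + m) (by omega), List.sum_take_succ xs m (by omega)]
        ring
      refine Prod.ext ?_ (Prod.ext ?_ ?_)
      · simpa using hc
      · simp only []
        rw [hc]
        set M := (List.range m).foldl
          (fun acc t => max acc (s - ((xs.take (wn + (t+1))).sum - (xs.take (t+1)).sum)))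
          (s - (xs.take wn).sum)
        set v := s - ((xs.take (wn + (m+1))).sum - (xs.take (m+1)).sum)
        rw [max_def]; split_ifs <;> omega
      · simp only []; push_cast; ring

theorem maxScore_spec : Claim_equal_maxScore := by
  intro xs k _ hk
  unfold Spec_maxScore maxScore maxScore_alt
  simp only []
  by_cases hkn : k ≥ (xs.length : Int)
  · simp [hkn]
  · rw [if_neg hkn, if_neg hkn]
    rw [not_le] at hkn
    unfold Pre_maxScore at hk
    set kn : Nat := k.toNat with hknat
    have hkcast : (kn : Int) = k := Int.toNat_of_nonneg hk
    have hklt : kn < xs.length := by omega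
    set wn : Nat := xs.length - kn with hwn
    -- B side: rewrite the table and the lookup list
    rw [pv_pre_spec]
    have htot : PySem.List.pyGetD
        ((List.range (xs.length + 1)).map (fun j => (xs.take j).sum)) ((xs.length : Nat) : Int) 0
        = xs.sum := by
      rw [pv_pre_get xs xs.length (le_refl _), List.take_of_length_le (le_refl _)]
    rw [htot]
    have hrange : PySem.List.pyRange 0 (k + 1) 1
        = (List.range (kn + 1)).map (fun t : Nat => (t : Int)) := by
      rw [PySem.List.pyRange_one]
      have : (k + 1 - 0).toNat = kn + 1 := by omega
      rw [this]
      apply List.map_congr_left; intro t _; simp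
    rw [hrange, List.map_map]
    have hmapeq : ((List.range (kn + 1)).map
        ((fun i => PySem.List.pyGetD ((List.range (xs.length + 1)).map (fun j => (xs.take j).sum)) i 0
            + xs.sum - PySem.List.pyGetD ((List.range (xs.length + 1)).map (fun j => (xs.take j).sum))
              ((xs.length : Int) - k + i) 0) ∘ (fun t : Nat => (t : Int))))
        = (List.range (kn + 1)).map
            (fun t : Nat => (xs.take t).sum + xs.sum - (xs.take (wn + t)).sum) := by
      apply List.map_congr_left
      intro t ht
      rw [List.mem_range] at ht
      simp only [Function.comp_apply]
      rw [pv_pre_get xs t (by omega)]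
      have hidx : (xs.length : Int) - k + (t : Int) = ((wn + t : Nat) : Int) := by
        push_cast; omega
      rw [hidx, pv_pre_get xs (wn + t) (by omega)]
    rw [hmapeq]
    -- nonempty list: peel off t = 0
    rw [List.range_succ_eq_map, List.map_cons, PySem.List.max?_id_cons]
    simp only [Option.getD_some]
    -- A side
    have hw0 : (0 : Int) ≤ (xs.length : Int) - k := by omega
    have hslice : (PySem.List.slice xs none (some ((xs.length : Int) - k))).sum
        = (xs.take wn).sum := by
      rw [PySem.List.slice_to _ hw0]
      congr 2; omega
    rw [hslice]
    have hArange : PySem.List.pyRange ((xs.length : Int) - k) (xs.length : Int) 1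
        = (List.range kn).map (fun t : Nat => ((wn : Int) + t)) := by
      rw [PySem.List.pyRange_one]
      have : ((xs.length : Int) - ((xs.length : Int) - k)).toNat = kn := by omega
      rw [this]
      apply List.map_congr_left; intro t _
      congr 1; omega
    rw [hArange, pv_A_inv xs xs.sum wn kn (by omega)]
    simp only []
    -- both sides are now running-max folds of the same values over List.range kn
    rw [List.map_map, List.foldl_map]
    have hinit : ((xs.take 0).sum + xs.sum - (xs.take (wn + 0)).sum : Int)
        = xs.sum - (xs.take wn).sum := by simp
    rw [hinit]
    apply List.foldl_ext
    intro acc t _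
    simp only [Function.comp_apply, Nat.succ_eq_add_one]
    congr 1
    ring
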